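-- pv_equiv track=rewrite | github.com/NyxGabriel/fnirs-help | Make New Masks/use_new_masks.py | count_lines_between_occurrences
-- ===== SOURCE A (Python) =====
-- def count_lines_between_occurrences(lst, start_word1, start_word2, end_word):
--     """
--     Counts the number of lines between the occurrence of a line containing two start words
--     and a line containing an end word in a given list of sub-lists.
--
--     In this case it is used to find the beginning and end of the GLM results that are important for the goal of the user
--
--     Parameters:
--     - lst (list of list of str): The main list containing sub-lists to be searched.
--     - start_word1 (str): The first word to look for in a line to determine the starting point.
--     - start_word2 (str): The second word to look for in the same line as start_word1 to determine the starting point.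
--     - end_word (str): The word to look for to determine the ending point.
--
--     Returns:
--     - count (int): Number of lines between the start and end occurrences.
--     - start_line (int): The line number (index) where both start words were found.
--
--     Note:
--     The search stops as soon as the end_word is found after the start words. If the end_word
--     is not found, the count would represent the lines till the end of the list after the start words.
--     """
--
--     count = 0
--     found_start = False
--     start_line=0
--
--     for index, sub_list in enumerate(lst):
--         if not found_start:
--             if start_word1 in sub_list and start_word2 in sub_list:
--                 found_start = True
--                 start_line=index
--         elif end_word in sub_list:
--             break
--         else:
--             count += 1
--
--     return count, start_line
-- ===== SOURCE B (Python) =====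
-- def count_lines_between_occurrences(lst, start_word1, start_word2, end_word):
--     # Precompute index lists, then do arithmetic: the count is
--     # (first end-word line index after the start line, or len(lst)) - start - 1.
--     starts = [i for i, sub_list in enumerate(lst)
--               if start_word1 in sub_list and start_word2 in sub_list]
--     if not starts:
--         return 0, 0
--     start = starts[0]
--     ends = [i for i, sub_list in enumerate(lst) if end_word in sub_list]
--     # binary search (hand-rolled bisect_right) for the first end index > start
--     lo, hi = 0, len(ends)
--     while lo < hi:
--         mid = (lo + hi) // 2
--         if ends[mid] <= start:
--             lo = mid + 1
--         else:
--             hi = mid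
--     end = ends[lo] if lo < len(ends) else len(lst)
--     return end - start - 1, start
-- ===== Notes on version B (the rewrite author's own statement) =====
-- stated objective: alternative
-- what changed: Instead of A's flag-driven counting scan, B precomputes the index lists of start-matching and end-word lines, picks the first start index, binary-searches the end-index list for the first index after it, and computes the count by arithmetic (end - start - 1).
import Mathlib
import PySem

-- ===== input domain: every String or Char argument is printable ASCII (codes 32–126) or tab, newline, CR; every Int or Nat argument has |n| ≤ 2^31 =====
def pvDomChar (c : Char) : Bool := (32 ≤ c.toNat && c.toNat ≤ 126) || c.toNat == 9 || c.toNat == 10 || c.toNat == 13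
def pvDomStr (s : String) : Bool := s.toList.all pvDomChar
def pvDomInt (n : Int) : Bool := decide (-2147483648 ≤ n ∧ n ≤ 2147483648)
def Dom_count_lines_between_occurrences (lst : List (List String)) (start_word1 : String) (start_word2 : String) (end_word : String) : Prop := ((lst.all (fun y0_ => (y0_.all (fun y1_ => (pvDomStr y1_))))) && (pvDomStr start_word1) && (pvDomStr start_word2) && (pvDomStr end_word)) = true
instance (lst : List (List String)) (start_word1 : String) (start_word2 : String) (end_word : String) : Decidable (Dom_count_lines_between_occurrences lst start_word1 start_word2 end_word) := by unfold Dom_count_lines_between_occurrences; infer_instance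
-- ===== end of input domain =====

-- B replaces A's flag-driven counting scan by precomputed index lists plus a binary search and arithmetic (count = end - start - 1); an alternative of the same O(n) cost.


-- ===== PORT A =====
-- A's single loop with the found_start flag, the break on end_word, and the running count.
def pvALoop (w1 w2 ew : String) : List (List String) → Nat → Nat → Bool → Nat → Int × Int
  | [], _, count, _, sl => ((count : Int), (sl : Int))
  | s :: rest, idx, count, found, sl =>
    if found = false then
      if s.contains w1 && s.contains w2 then
        pvALoop w1 w2 ew rest (idx + 1) count true idx
      else
        pvALoop w1 w2 ew rest (idx + 1) count false sl
    else if s.contains ew then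
      ((count : Int), (sl : Int))
    else
      pvALoop w1 w2 ew rest (idx + 1) (count + 1) found sl

def count_lines_between_occurrences (lst : List (List String)) (start_word1 : String) (start_word2 : String) (end_word : String) : Int × Int :=
  pvALoop start_word1 start_word2 end_word lst 0 0 false 0

-- ===== PORT B =====
-- the index-list comprehension '[i for i, s in enumerate(lst) if p(s)]'
def pvIdxList (p : List String → Bool) : List (List String) → Nat → List Nat
  | [], _ => []
  | s :: rest, i => if p s then i :: pvIdxList p rest (i + 1) else pvIdxList p rest (i + 1)

-- the hand-rolled bisect_right while-loop of Source B
def pvBisect (ends : List Nat) (start : Nat) (lo hi : Nat) : Nat :=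
  if h : lo < hi then
    let mid := (lo + hi) / 2
    if ends.getD mid 0 ≤ start then pvBisect ends start (mid + 1) hi
    else pvBisect ends start lo mid
  else lo
termination_by hi - lo
decreasing_by all_goals omega

def count_lines_between_occurrences_alt (lst : List (List String)) (start_word1 : String) (start_word2 : String) (end_word : String) : Int × Int :=
  match pvIdxList (fun s => s.contains start_word1 && s.contains start_word2) lst 0 with
  | [] => (0, 0)
  | start :: _ =>
    let ends := pvIdxList (fun s => s.contains end_word) lst 0
    let lo := pvBisect ends start 0 ends.length
    let e : Nat := if lo < ends.length then ends.getD lo 0 else lst.length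
    ((e : Int) - (start : Int) - 1, (start : Int))

-- ===== PRECONDITION & SPEC =====
def Spec_count_lines_between_occurrences (lst : List (List String)) (start_word1 : String) (start_word2 : String) (end_word : String) (out : Int × Int) : Prop := out = count_lines_between_occurrences_alt lst start_word1 start_word2 end_word
instance (lst : List (List String)) (start_word1 : String) (start_word2 : String) (end_word : String) (out : Int × Int) : Decidable (Spec_count_lines_between_occurrences lst start_word1 start_word2 end_word out) := by unfold Spec_count_lines_between_occurrences; infer_instance

-- ===== CLAIM (what is proved, stated in full; the proofs are below) =====
def Claim_equal_count_lines_between_occurrences : Prop := ∀ (lst : List (List String)) (start_word1 : String) (start_word2 : String) (end_word : String), Dom_count_lines_between_occurrences lst start_word1 start_word2 end_word → Spec_count_lines_between_occurrences lst start_word1 start_word2 end_word (count_lines_between_occurrences lst start_word1 start_word2 end_word)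

-- ===== LEMMAS AND PROOFS =====

-- proof-only reference helpers: first index satisfying p, and the count until the first p-line
def pvFind (p : List String → Bool) : List (List String) → Nat → Option Nat
  | [], _ => none
  | s :: rest, i => if p s then some i else pvFind p rest (i + 1)

def pvCountP (p : List String → Bool) : List (List String) → Nat
  | [] => 0
  | s :: rest => if p s then 0 else pvCountP p rest + 1

-- once found, A's loop just adds pvCountP of the remaining lines to its count
theorem pvALoop_found (w1 w2 ew : String) (l : List (List String)) (idx count sl : Nat) :
    pvALoop w1 w2 ew l idx count true sl =
      ((Int.ofNat (count + pvCountP (fun s => s.contains ew) l)), (sl : Int)) := by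
  induction l generalizing idx count with
  | nil => simp [pvALoop, pvCountP]
  | cons s rest ih =>
    by_cases h : ew ∈ s
    · simp [pvALoop, pvCountP, h]
    · simp [pvALoop, pvCountP, h, ih]
      ring

theorem pvFind_ge (p : List String → Bool) (l : List (List String)) (i j : Nat)
    (h : pvFind p l i = some j) : i ≤ j := by
  induction l generalizing i with
  | nil => simp [pvFind] at h
  | cons s rest ih =>
    rw [pvFind] at h
    split at h
    · simp at h; omega
    · have := ih (i + 1) h; omega

theorem pvFind_lt (p : List String → Bool) (l : List (List String)) (i j : Nat)
    (h : pvFind p l i = some j) : j < i + l.length := by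
  induction l generalizing i with
  | nil => simp [pvFind] at h
  | cons s rest ih =>
    rw [pvFind] at h
    split at h
    · simp at h; simp [← h]
    · have := ih (i + 1) h; simp; omega

-- A's loop in terms of pvFind/pvCountP
theorem pvALoop_search (w1 w2 ew : String) (l : List (List String)) (idx : Nat) :
    pvALoop w1 w2 ew l idx 0 false 0 =
      match pvFind (fun s => s.contains w1 && s.contains w2) l idx with
      | none => (0, 0)
      | some j => ((Int.ofNat (pvCountP (fun s => s.contains ew) (l.drop (j + 1 - idx)))), (j : Int)) := by
  induction l generalizing idx with
  | nil => simp [pvALoop, pvFind]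
  | cons s rest ih =>
    by_cases hc : w1 ∈ s ∧ w2 ∈ s
    · simp [pvALoop, pvFind, hc, pvALoop_found]
    · have hrec := ih (idx + 1)
      simp [pvALoop, pvFind, hc, hrec]
      cases hf : pvFind (fun s => decide (w1 ∈ s) && decide (w2 ∈ s)) rest (idx + 1) with
      | none => simp
      | some j =>
        have hge := pvFind_ge _ rest (idx + 1) j hf
        have h1 : j + 1 - idx = (j - idx) + 1 := by omega
        simp [h1]

-- B's starts list begins with pvFind's answer
theorem pvIdxList_head (p : List String → Bool) (l : List (List String)) (i : Nat) :
    (pvIdxList p l i).head? = pvFind p l i := by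
  induction l generalizing i with
  | nil => simp [pvIdxList, pvFind]
  | cons s rest ih =>
    by_cases h : p s <;> simp [pvIdxList, pvFind, h, ih]

theorem pvIdxList_append (p : List String → Bool) (l1 l2 : List (List String)) (i : Nat) :
    pvIdxList p (l1 ++ l2) i = pvIdxList p l1 i ++ pvIdxList p l2 (i + l1.length) := by
  induction l1 generalizing i with
  | nil => simp [pvIdxList]
  | cons s rest ih =>
    have : i + 1 + rest.length = i + (rest.length + 1) := by omega
    by_cases h : p s <;> simp [pvIdxList, h, ih, this]

theorem pvIdxList_mem_lb (p : List String → Bool) (l : List (List String)) (i x : Nat)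
    (h : x ∈ pvIdxList p l i) : i ≤ x := by
  induction l generalizing i with
  | nil => simp [pvIdxList] at h
  | cons s rest ih =>
    rw [pvIdxList] at h
    split at h
    · rcases List.mem_cons.1 h with h1 | h1
      · omega
      · have := ih (i + 1) h1; omega
    · have := ih (i + 1) h; omega

theorem pvIdxList_mem_ub (p : List String → Bool) (l : List (List String)) (i x : Nat)
    (h : x ∈ pvIdxList p l i) : x < i + l.length := by
  induction l generalizing i with
  | nil => simp [pvIdxList] at h
  | cons s rest ih =>
    rw [pvIdxList] at h
    simp only [List.length_cons]
    split at h
    · rcases List.mem_cons.1 h with h1 | h1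
      · omega
      · have := ih (i + 1) h1; omega
    · have := ih (i + 1) h; omega

-- pvCountP in terms of the index list of p-lines
theorem pvIdxList_nil_count (p : List String → Bool) (l : List (List String)) (i : Nat)
    (h : pvIdxList p l i = []) : pvCountP p l = l.length := by
  induction l generalizing i with
  | nil => simp [pvCountP]
  | cons s rest ih =>
    by_cases hp : p s = true
    · rw [pvIdxList, if_pos hp] at h
      simp at h
    · rw [pvIdxList, if_neg hp] at h
      have hp' : p s = false := by revert hp; cases p s <;> simp
      simp [pvCountP, hp', ih (i + 1) h]

theorem pvIdxList_cons_count (p : List String → Bool) (l : List (List String)) (i e : Nat)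
    (t : List Nat) (h : pvIdxList p l i = e :: t) : pvCountP p l = e - i ∧ i ≤ e := by
  induction l generalizing i e t with
  | nil => simp [pvIdxList] at h
  | cons s rest ih =>
    by_cases hp : p s = true
    · rw [pvIdxList, if_pos hp] at h
      injection h with h1 h2
      subst h1
      simp [pvCountP, hp]
    · rw [pvIdxList, if_neg hp] at h
      have hp' : p s = false := by revert hp; cases p s <;> simp
      obtain ⟨h1, h2⟩ := ih (i + 1) e t h
      refine ⟨?_, by omega⟩
      simp [pvCountP, hp', h1]
      omega

-- the binary search returns the length of the ≤-start block
theorem pvBisect_eq (start : Nat) (A1 A2 : List Nat)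
    (h1 : ∀ x ∈ A1, x ≤ start) (h2 : ∀ x ∈ A2, start < x) :
    ∀ k lo hi, hi - lo ≤ k → lo ≤ A1.length → A1.length ≤ hi → hi ≤ A1.length + A2.length →
      pvBisect (A1 ++ A2) start lo hi = A1.length := by
  intro k
  induction k with
  | zero =>
    intro lo hi hk hlo hhi _
    rw [pvBisect]
    have : ¬ lo < hi := by omega
    simp [this]; omega
  | succ n ih =>
    intro lo hi hk hlo hhi hlen
    rw [pvBisect]
    by_cases hlh : lo < hi
    · simp only [hlh, dif_pos]
      set mid := (lo + hi) / 2 with hmid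
      have hmlo : lo ≤ mid := by omega
      have hmhi : mid < hi := by omega
      have hmlen : mid < (A1 ++ A2).length := by simp; omega
      have hget : (A1 ++ A2).getD mid 0 = (A1 ++ A2)[mid] := List.getD_eq_getElem _ 0 hmlen
      have hmem : (A1 ++ A2)[mid] ∈ A1 ++ A2 := List.getElem_mem hmlen
      by_cases hle : (A1 ++ A2).getD mid 0 ≤ start
      · simp only [hle, if_pos]
        have hmA1 : mid < A1.length := by
          by_contra hge
          have : (A1 ++ A2)[mid] ∈ A2 := by
            rw [List.getElem_append_right (by omega)]
            exact List.getElem_mem (by simp at hmlen ⊢; omega)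
          have := h2 _ this
          omega
        exact ih (mid + 1) hi (by omega) (by omega) (by omega) hlen
      · simp only [hle, if_neg, not_false_iff]
        have hmA1 : A1.length ≤ mid := by
          by_contra hlt
          have : (A1 ++ A2)[mid] ∈ A1 := by
            rw [List.getElem_append_left (by omega)]
            exact List.getElem_mem (by omega)
          have := h1 _ this
          omega
        exact ih lo mid (by omega) (by omega) (by omega) (by omega)
    · simp [hlh]; omega

-- ===== VERDICT (by name: the statement is the Claim_ definition above) =====
theorem count_lines_between_occurrences_spec : Claim_equal_count_lines_between_occurrences := by
  intro lst w1 w2 ew _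
  unfold Spec_count_lines_between_occurrences count_lines_between_occurrences count_lines_between_occurrences_alt
  rw [pvALoop_search]
  cases hs : pvIdxList (fun s => s.contains w1 && s.contains w2) lst 0 with
  | nil =>
    have hf : pvFind (fun s => s.contains w1 && s.contains w2) lst 0 = none := by
      rw [← pvIdxList_head, hs]; rfl
    simp only [hf]
  | cons start tl =>
    have hfind : pvFind (fun s => s.contains w1 && s.contains w2) lst 0 = some start := by
      rw [← pvIdxList_head, hs]; rfl
    have hlt : start < lst.length := by
      have := pvFind_lt _ lst 0 start hfind; omega
    have hsplit : lst = lst.take (start + 1) ++ lst.drop (start + 1) :=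
      (List.take_append_drop _ _).symm
    have htlen : (lst.take (start + 1)).length = start + 1 := by simp; omega
    have hends : pvIdxList (fun s => s.contains ew) lst 0
        = pvIdxList (fun s => s.contains ew) (lst.take (start + 1)) 0
          ++ pvIdxList (fun s => s.contains ew) (lst.drop (start + 1)) (start + 1) := by
      conv_lhs => rw [hsplit]
      rw [pvIdxList_append, htlen, Nat.zero_add]
    have hb1 : ∀ x ∈ pvIdxList (fun s => s.contains ew) (lst.take (start + 1)) 0, x ≤ start := by
      intro x hx
      have := pvIdxList_mem_ub _ _ 0 x hx
      rw [htlen] at this; omega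
    have hb2 : ∀ x ∈ pvIdxList (fun s => s.contains ew) (lst.drop (start + 1)) (start + 1), start < x := by
      intro x hx
      have := pvIdxList_mem_lb _ _ (start + 1) x hx
      omega
    have hbis := pvBisect_eq start
      (pvIdxList (fun s => s.contains ew) (lst.take (start + 1)) 0)
      (pvIdxList (fun s => s.contains ew) (lst.drop (start + 1)) (start + 1))
      hb1 hb2
      ((pvIdxList (fun s => s.contains ew) (lst.take (start + 1)) 0
        ++ pvIdxList (fun s => s.contains ew) (lst.drop (start + 1)) (start + 1)).length)
      0
      ((pvIdxList (fun s => s.contains ew) (lst.take (start + 1)) 0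
        ++ pvIdxList (fun s => s.contains ew) (lst.drop (start + 1)) (start + 1)).length)
      (by omega) (by omega) (by simp) (by simp)
    simp only [hfind, hends, Nat.sub_zero]
    cases h2 : pvIdxList (fun s => s.contains ew) (lst.drop (start + 1)) (start + 1) with
    | nil =>
      rw [h2] at hbis
      rw [hbis]
      have hnone : ¬ (pvIdxList (fun s => s.contains ew) (lst.take (start + 1)) 0).length
          < ((pvIdxList (fun s => s.contains ew) (lst.take (start + 1)) 0) ++ ([] : List Nat)).length := by
        simp
      rw [if_neg hnone]
      have hcnt : pvCountP (fun s => s.contains ew) (lst.drop (start + 1))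
          = (lst.drop (start + 1)).length := pvIdxList_nil_count _ _ (start + 1) h2
      have hdl : (lst.drop (start + 1)).length = lst.length - (start + 1) := by simp
      simp only [Prod.mk.injEq]
      refine ⟨?_, trivial⟩
      rw [hcnt, hdl]
      simp only [Int.ofNat_eq_natCast]
      omega
    | cons a t =>
      rw [h2] at hbis
      rw [hbis]
      have hsome : (pvIdxList (fun s => s.contains ew) (lst.take (start + 1)) 0).length
          < ((pvIdxList (fun s => s.contains ew) (lst.take (start + 1)) 0) ++ (a :: t)).length := by
        simp
      rw [if_pos hsome]
      have hgd : ((pvIdxList (fun s => s.contains ew) (lst.take (start + 1)) 0) ++ (a :: t)).getD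
          (pvIdxList (fun s => s.contains ew) (lst.take (start + 1)) 0).length 0 = a := by
        rw [List.getD_eq_getElem _ 0 hsome, List.getElem_append_right (by omega)]
        simp
      rw [hgd]
      obtain ⟨hc, hle⟩ := pvIdxList_cons_count (fun s => s.contains ew) (lst.drop (start + 1)) (start + 1) a t h2
      simp only [Prod.mk.injEq]
      refine ⟨?_, trivial⟩
      rw [hc]
      simp only [Int.ofNat_eq_natCast]
      omega
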